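-- pv_equiv track=rewrite | github.com/EnricoMoses/PCU | Pratikum/10-28/pola-naik-turun-list.py | countSegment
-- ===== SOURCE A (Python) =====
-- def countSegment(arr):
--     # buat variabel awal naik, turun = 0
--     naik = 0
--     turun = 0
--
--     # jika panjang list kurang dari 2 maka tidak ada segmen
--     if len(arr) < 2:
--         # langsung return 0, 0
--         return naik, turun
--
--     # buat variabel arah untuk menentukan arah
--     # misal 1 -> segmen naik
--     # -1 -> segmen turun
--     # 0 -> putus karena menemukan isi yg sama
--     # buat terlebih dahulu arahnya 0
--     arah = 0
--
--     # loop sesuai jumlah array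
--     for i in range(1, len(arr)):
--         # jika elemen saat ini lebih besar dari elemen sebelumnya
--         if arr[i] > arr[i-1]:
--             # agar tidak menabrak dengan segmennya sendiri
--             if arah != 1:
--                 # tambahkan naik +1
--                 naik += 1
--                 # arah kita jadikan 1 karena naik
--                 arah = 1
--         #  jika elemen saat ini lebih kecil dari elemen sebelumnya
--         elif arr[i] < arr[i-1]:
--             # agar tidak menabrak dengan segmennya sendiri
--             if arah != -1:
--                 # tambahkan turun +1
--                 turun += 1
--                 # arah jadikan -1 karena turun
--                 arah = -1
--         else:
--             # kondisi ketika elemen sama dengan elemen sebelumnya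
--             # reset arah menjadi 0
--             arah = 0
--     # lalu returnkan jumlah naik, turun nya
--     return naik, turun
-- ===== SOURCE B (Python) =====
-- def countSegment(arr):
--     # build the adjacent-difference sign sequence, then count segment starts:
--     # a rising segment starts exactly where the sign becomes 1 and the previous
--     # sign (0 before the start) was not 1; symmetrically for falling segments.
--     signs = [(b > a) - (b < a) for a, b in zip(arr, arr[1:])]
--     naik = sum(1 for p, s in zip([0] + signs, signs) if p != 1 and s == 1)
--     turun = sum(1 for p, s in zip([0] + signs, signs) if p != -1 and s == -1)
--     return naik, turun
-- ===== Notes on version B (the rewrite author's own statement) =====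
-- stated objective: alternative
-- what changed: Replaces A's single stateful index loop (direction register arah) with a two-stage decomposition: first build the adjacent-difference sign sequence via zip, then count rising/falling segment starts by scanning the sign sequence zipped with its 0-padded shift.
import Mathlib
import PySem

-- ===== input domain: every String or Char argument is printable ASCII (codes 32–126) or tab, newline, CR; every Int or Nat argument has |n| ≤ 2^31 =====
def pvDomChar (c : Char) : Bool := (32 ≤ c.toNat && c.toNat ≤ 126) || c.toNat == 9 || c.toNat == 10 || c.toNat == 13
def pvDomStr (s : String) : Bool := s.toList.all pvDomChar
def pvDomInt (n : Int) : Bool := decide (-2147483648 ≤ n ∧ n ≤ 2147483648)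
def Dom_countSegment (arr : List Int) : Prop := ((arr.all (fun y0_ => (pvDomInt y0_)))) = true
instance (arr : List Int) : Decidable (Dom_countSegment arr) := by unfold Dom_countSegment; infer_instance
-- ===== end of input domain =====

-- B rebuilds A's answer from the adjacent-difference sign sequence (build-then-scan) instead of A's single stateful loop; objective: alternative decomposition.

-- ===== PORT A =====
-- A: stateful pass over indices 1..len-1 with a direction register arah ∈ {1,-1,0}.
def countSegment (arr : List Int) : Int × Int :=
  let naik : Int := 0
  let turun : Int := 0
  if arr.length < 2 then (naik, turun)
  else
    let r := (PySem.List.pyRange 1 arr.length).foldl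
      (fun (st : Int × Int × Int) i =>
        if PySem.List.pyGetD arr (i - 1) 0 < PySem.List.pyGetD arr i 0 then
          (if st.2.2 ≠ 1 then (st.1 + 1, st.2.1, 1) else st)
        else if PySem.List.pyGetD arr i 0 < PySem.List.pyGetD arr (i - 1) 0 then
          (if st.2.2 ≠ -1 then (st.1, st.2.1 + 1, -1) else st)
        else (st.1, st.2.1, 0))
      (naik, turun, 0)
    (r.1, r.2.1)

-- ===== PORT B =====
-- B: signs = [(b>a)-(b<a) for a,b in zip(arr, arr[1:])]; count segment starts in zip([0]+signs, signs).
def countSegment_alt (arr : List Int) : Int × Int :=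
  let signs := (arr.zip (PySem.List.slice arr (some 1) none)).map
    (fun p => (if p.1 < p.2 then (1 : Int) else 0) - (if p.2 < p.1 then (1 : Int) else 0))
  let naik : Int := ((List.zip (0 :: signs) signs).countP (fun q => q.1 != 1 && q.2 == 1) : Nat)
  let turun : Int := ((List.zip (0 :: signs) signs).countP (fun q => q.1 != -1 && q.2 == -1) : Nat)
  (naik, turun)

-- ===== PRECONDITION & SPEC =====
def Spec_countSegment (arr : List Int) (out : Int × Int) : Prop := out = countSegment_alt arr
instance (arr : List Int) (out : Int × Int) : Decidable (Spec_countSegment arr out) := by unfold Spec_countSegment; infer_instance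

-- ===== CLAIM (what is proved, stated in full; the proofs are below) =====
def Claim_equal_countSegment : Prop := ∀ (arr : List Int), Dom_countSegment arr → Spec_countSegment arr (countSegment arr)

-- ===== LEMMAS AND PROOFS =====

-- A's loop body abstracted over the pair (previous element, current element), and B's sign of a pair.
def pvStep (st : Int × Int × Int) (p : Int × Int) : Int × Int × Int :=
  if p.1 < p.2 then (if st.2.2 ≠ 1 then (st.1 + 1, st.2.1, 1) else st)
  else if p.2 < p.1 then (if st.2.2 ≠ -1 then (st.1, st.2.1 + 1, -1) else st)
  else (st.1, st.2.1, 0)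

def pvSign (p : Int × Int) : Int :=
  (if p.1 < p.2 then (1 : Int) else 0) - (if p.2 < p.1 then (1 : Int) else 0)

-- A's index fold equals folding A's step over the adjacent pairs.

theorem pvFold_idx_pairs {β : Type} (f : β → Int × Int → β) :
    ∀ (xs : List Int) (init : β),
      List.foldl
        (fun st i => f st (PySem.List.pyGetD xs (i - 1) 0, PySem.List.pyGetD xs i 0))
        init (PySem.List.pyRange 1 xs.length)
      = List.foldl f init (xs.zip xs.tail) := by
  intro xs init
  rcases xs with _ | ⟨y, ys⟩
  · simp [PySem.List.pyRange]
  · have hlen : (((0,0) : Int × Int) :: (y :: ys).zip ys).length = (y :: ys).length := by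
      simp [List.length_zip]
    have hcong :
        List.foldl
          (fun st i => f st (PySem.List.pyGetD (y :: ys) (i - 1) 0, PySem.List.pyGetD (y :: ys) i 0))
          init (PySem.List.pyRange 1 (y :: ys).length)
        = List.foldl
          (fun st i => f st (PySem.List.pyGetD (((0,0) : Int × Int) :: (y :: ys).zip ys) i (0, 0)))
          init (PySem.List.pyRange 1 (y :: ys).length) := by
      apply PySem.List.foldl_congr_mem
      intro st i hi
      rw [PySem.List.mem_pyRange_one] at hi
      obtain ⟨h1, h2⟩ := hi
      have hlt : i < ((y :: ys).length : Int) := h2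
      have hn : i.toNat < (y :: ys).length := by omega
      have hn1 : 1 ≤ i.toNat := by omega
      rw [PySem.List.pyGetD_eq_getElem _ _ (by omega) (by omega),
          PySem.List.pyGetD_eq_getElem _ _ (by omega) (by omega),
          PySem.List.pyGetD_eq_getElem _ _ (by omega) (by omega)]
      congr 1
      have hit : (i - 1).toNat = i.toNat - 1 := by omega
      have hne : i.toNat ≠ 0 := by omega
      have hn2 : i.toNat - 1 < ys.length := by
        have h' := hn; simp only [List.length_cons] at h'; omega
      have htl : (y :: ys)[i.toNat] = ys[i.toNat - 1]'(hn2) := by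
        rw [List.getElem_cons]; simp [hne]
      simp [hit, List.getElem_cons, hne, List.getElem_zip, htl]
    rw [hcong]
    have h2 := PySem.List.foldl_pyRange_pyGetD (((0,0) : Int × Int) :: (y :: ys).zip ys)
        ((0,0) : Int × Int) f init (a := 1) (by norm_num)
    simp only [PySem.List.len] at h2
    rw [hlen] at h2
    rw [h2]
    simp

-- counting lemma: folding A's step over pairs counts the segment starts of the sign sequence.
theorem pvCount_fold :
    ∀ (ps : List (Int × Int)) (naik turun arah : Int),
      arah = 1 ∨ arah = -1 ∨ arah = 0 →
      (List.foldl pvStep (naik, turun, arah) ps).1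
          = naik + (((arah :: ps.map pvSign).zip (ps.map pvSign)).countP
              (fun q => q.1 != 1 && q.2 == 1) : Nat)
        ∧ (List.foldl pvStep (naik, turun, arah) ps).2.1
          = turun + (((arah :: ps.map pvSign).zip (ps.map pvSign)).countP
              (fun q => q.1 != -1 && q.2 == -1) : Nat) := by
  intro ps
  induction ps with
  | nil => intro naik turun arah _; simp
  | cons p rest ih =>
    intro naik turun arah harah
    have hstep : pvStep (naik, turun, arah) p
        = (naik + (if pvSign p = 1 ∧ arah ≠ 1 then 1 else 0),
           turun + (if pvSign p = -1 ∧ arah ≠ -1 then 1 else 0),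
           pvSign p) := by
      rcases lt_trichotomy p.1 p.2 with h | h | h
      · simp [pvStep, pvSign, h, not_lt.mpr (le_of_lt h)]
        by_cases ha : arah = 1 <;> simp [ha]
      · simp [pvStep, pvSign, h]
      · simp [pvStep, pvSign, h, not_lt.mpr (le_of_lt h)]
        by_cases ha : arah = -1 <;> simp [ha]
    have hsign : pvSign p = 1 ∨ pvSign p = -1 ∨ pvSign p = 0 := by
      unfold pvSign; split_ifs <;> omega
    obtain ⟨ih1, ih2⟩ := ih (naik + (if pvSign p = 1 ∧ arah ≠ 1 then 1 else 0))
      (turun + (if pvSign p = -1 ∧ arah ≠ -1 then 1 else 0)) (pvSign p) hsign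
    rw [List.foldl_cons, hstep]
    constructor
    · rw [ih1]
      simp only [List.map_cons, List.zip_cons_cons, List.countP_cons]
      push_cast
      by_cases h1 : pvSign p = 1 <;> by_cases h2 : arah = 1 <;>
        simp [h1, h2] <;> omega
    · rw [ih2]
      simp only [List.map_cons, List.zip_cons_cons, List.countP_cons]
      push_cast
      by_cases h1 : pvSign p = -1 <;> by_cases h2 : arah = -1 <;>
        simp [h1, h2] <;> omega

-- ===== VERDICT (by name: the statement is the Claim_ definition above) =====
theorem countSegment_spec : Claim_equal_countSegment := by
  intro arr _
  unfold Spec_countSegment countSegment countSegment_alt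
  simp only [PySem.List.slice_from_one]
  by_cases hl : arr.length < 2
  · rw [if_pos hl]
    rcases arr with _ | ⟨x, xs⟩
    · simp
    · rcases xs with _ | ⟨y, ys⟩
      · simp
      · simp at hl
  · rw [if_neg hl]
    have hbody :
        (fun (st : Int × Int × Int) (i : Int) =>
          if PySem.List.pyGetD arr (i - 1) 0 < PySem.List.pyGetD arr i 0 then
            (if st.2.2 ≠ 1 then (st.1 + 1, st.2.1, 1) else st)
          else if PySem.List.pyGetD arr i 0 < PySem.List.pyGetD arr (i - 1) 0 then
            (if st.2.2 ≠ -1 then (st.1, st.2.1 + 1, -1) else st)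
          else (st.1, st.2.1, 0))
        = fun st i => pvStep st (PySem.List.pyGetD arr (i - 1) 0, PySem.List.pyGetD arr i 0) := rfl
    rw [hbody, pvFold_idx_pairs pvStep arr ((0 : Int), (0 : Int), (0 : Int))]
    have hsgn : (fun p : Int × Int =>
        (if p.1 < p.2 then (1 : Int) else 0) - (if p.2 < p.1 then (1 : Int) else 0)) = pvSign := rfl
    rw [hsgn]
    obtain ⟨h1, h2⟩ := pvCount_fold (arr.zip arr.tail) 0 0 0 (Or.inr (Or.inr rfl))
    rw [Prod.ext_iff]
    constructor
    · rw [h1]; simp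
    · rw [h2]; simp
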